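-- pv_equiv track=rewrite | github.com/milkomardev/Python-Advanced-SoftUni- | exam_preparation/03.list_pureness.py | best_list_pureness
-- ===== SOURCE A (Python) =====
-- def best_list_pureness(list_of_numbers, number):
--     max_sum = float('-inf')
--     best_rotation = 0
--     for rotation in range(number+1):
--         total_sum = 0
--         for index in range(len(list_of_numbers)):
--             total_sum += index*list_of_numbers[index]
--
--         if total_sum > max_sum:
--             max_sum = total_sum
--             best_rotation = rotation
--
--         list_of_numbers.insert(0, list_of_numbers.pop(-1))
--
--     return f"Best pureness {max_sum} after {best_rotation} rotations"
-- ===== SOURCE B (Python) =====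
-- def best_list_pureness(list_of_numbers, number):
--     n = len(list_of_numbers)
--     total = sum(list_of_numbers)
--     cur = sum(i * x for i, x in enumerate(list_of_numbers))
--     sums = []
--     for k in range(min(number, n - 1) + 1):
--         if k:
--             cur += total - n * list_of_numbers[n - k]
--         sums.append(cur)
--     best = max(sums)
--     return f"Best pureness {best} after {sums.index(best)} rotations"
-- ===== Notes on version B (the rewrite author's own statement) =====
-- stated objective: faster
-- what changed: B replaces A's per-rotation O(n) recomputation over number+1 physical rotations by one incremental pass (cur += total - n*moved_element) over the min(number, n-1) distinct rotations, collecting the candidate sums and reporting max() and its first index.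
-- outside the precondition, e.g. on best_list_pureness([0], -1): A returns 'Best pureness -inf after 0 rotations', B raises ValueError
import Mathlib
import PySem

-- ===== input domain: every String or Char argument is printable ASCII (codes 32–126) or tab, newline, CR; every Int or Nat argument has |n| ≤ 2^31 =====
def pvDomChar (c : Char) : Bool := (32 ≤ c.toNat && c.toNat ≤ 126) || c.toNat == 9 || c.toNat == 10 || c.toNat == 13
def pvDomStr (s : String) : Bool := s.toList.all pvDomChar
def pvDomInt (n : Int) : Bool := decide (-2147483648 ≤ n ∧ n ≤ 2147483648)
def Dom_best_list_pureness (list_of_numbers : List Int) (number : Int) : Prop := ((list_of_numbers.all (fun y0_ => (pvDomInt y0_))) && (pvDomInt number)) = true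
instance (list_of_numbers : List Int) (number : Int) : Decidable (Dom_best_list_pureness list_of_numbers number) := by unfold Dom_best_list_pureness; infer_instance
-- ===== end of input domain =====

-- B computes the best rotation in one O(n) pass (incremental weighted-sum update, periodicity
-- cutoff at min(number, n-1)) instead of A's O(number*n) recompute-per-rotation; Python A also
-- mutates its list argument in place (rotates it), B does not — the equivalence is about the
-- RETURN value only.

-- ===== PORT A =====
-- inner loop: total_sum = sum of index*list[index] over range(len(list))
def pvInnerSum (l : List Int) : Int :=
  (PySem.List.pyRange 0 (l.length : Int) 1).foldl
    (fun s i => s + i * PySem.List.pyGetD l i 0) 0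

-- 'total_sum > max_sum' where max_sum starts as float('-inf') (modelled as none)
def pvGtOpt (t : Int) (mx : Option Int) : Bool :=
  match mx with
  | none => true
  | some v => decide (v < t)

-- list.insert(0, list.pop(-1)) — rotate right in place
def pvAPopInsert (t : List Int) : List Int :=
  match PySem.List.pop? t (-1) with
  | some r => PySem.List.insert r.2 0 r.1
  | none => t   -- Python raises IndexError here (empty list); excluded by Pre_

-- one iteration of A's for-loop: compute total_sum, update (max_sum, best_rotation), rotate right
def pvAStep (st : List Int × Option Int × Int) (rot : Int) : List Int × Option Int × Int :=
  let total := pvInnerSum st.1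
  let mxbr := if pvGtOpt total st.2.1 then (some total, rot) else (st.2.1, st.2.2)
  (pvAPopInsert st.1, mxbr.1, mxbr.2)

def best_list_pureness (list_of_numbers : List Int) (number : Int) : String :=
  let st := (PySem.List.pyRange 0 (number + 1) 1).foldl pvAStep (list_of_numbers, none, 0)
  "Best pureness " ++ (match st.2.1 with
    | some v => PySem.Int.toStr v
    | none => "-inf") ++ " after " ++ PySem.Int.toStr st.2.2 ++ " rotations"

-- ===== PORT B =====
-- one step of B's loop: if k: cur += total - n*l[n-k]; sums.append(cur)
def pvBStep (l : List Int) (total n : Int) (st : Int × List Int) (k : Int) : Int × List Int :=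
  let cur := if k = 0 then st.1 else st.1 + total - n * PySem.List.pyGetD l (n - k) 0
  (cur, st.2 ++ [cur])

def best_list_pureness_alt (list_of_numbers : List Int) (number : Int) : String :=
  let n : Int := list_of_numbers.length
  let total := list_of_numbers.sum
  let cur := (PySem.List.enumerate list_of_numbers 0).foldl (fun acc p => acc + p.1 * p.2) 0
  let sums := ((PySem.List.pyRange 0 (min number (n - 1) + 1) 1).foldl
    (pvBStep list_of_numbers total n) (cur, [])).2
  match PySem.List.max? sums (fun x => x) with
  | none => ""   -- Python max([]) raises ValueError here; excluded by Pre_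
  | some best =>
    "Best pureness " ++ PySem.Int.toStr best ++ " after "
      ++ PySem.Int.toStr (((PySem.List.index? sums best).getD 0 : Nat) : Int) ++ " rotations"

-- ===== PRECONDITION & SPEC =====
-- Pre_ excludes (a) the empty list, where A raises IndexError from pop(-1) (and B's max([])
-- raises ValueError), and (b) number < 0, where A's loop never runs and it returns the float
-- string '-inf', not an integer rendering (B's max([]) raises ValueError there too).
def Pre_best_list_pureness (list_of_numbers : List Int) (number : Int) : Prop :=
  list_of_numbers ≠ [] ∧ 0 ≤ number
instance (list_of_numbers : List Int) (number : Int) : Decidable (Pre_best_list_pureness list_of_numbers number) := by unfold Pre_best_list_pureness; infer_instance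

def pvWitness_best_list_pureness : List Int × Int := ([1, 2, 3], 2)

def Spec_best_list_pureness (list_of_numbers : List Int) (number : Int) (out : String) : Prop := out = best_list_pureness_alt list_of_numbers number
instance (list_of_numbers : List Int) (number : Int) (out : String) : Decidable (Spec_best_list_pureness list_of_numbers number out) := by unfold Spec_best_list_pureness; infer_instance

-- ===== CLAIM (what is proved, stated in full; the proofs are below) =====
def Claim_equal_best_list_pureness : Prop := ∀ (list_of_numbers : List Int) (number : Int), Dom_best_list_pureness list_of_numbers number → Pre_best_list_pureness list_of_numbers number → Spec_best_list_pureness list_of_numbers number (best_list_pureness list_of_numbers number)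


-- ===== LEMMAS AND PROOFS =====

-- weighted sum W(l) = sum of i*l[i]
def pvW : List Int → Int
  | [] => 0
  | _ :: xs => pvW xs + xs.sum

-- one right rotation (Python's list.insert(0, list.pop(-1)))
def pvRot (l : List Int) : List Int :=
  match l.getLast? with
  | none => []
  | some x => x :: l.dropLast

-- first-maximum of W over rotations 0..m
def pvBest (l : List Int) : Nat → Int × Nat
  | 0 => (pvW l, 0)
  | m+1 =>
    let p := pvBest l m
    let v := pvW (pvRot^[m+1] l)
    if p.1 < v then (v, m+1) else p

theorem pvW_concat (ys : List Int) (x : Int) :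
    pvW (ys ++ [x]) = pvW ys + (ys.length : Int) * x := by
  induction ys with
  | nil => simp [pvW]
  | cons y ys ih => simp [pvW, ih, List.sum_append]; ring

theorem pvRot_concat (ys : List Int) (x : Int) : pvRot (ys ++ [x]) = x :: ys := by
  simp [pvRot]

theorem pvInnerSum_eq (l : List Int) : pvInnerSum l = pvW l := by
  induction l using List.reverseRecOn with
  | nil => simp [pvInnerSum, pvW, PySem.List.pyRange_one_eq_nil]
  | append_singleton ys x ih =>
    unfold pvInnerSum
    have hlen : (((ys ++ [x]).length : Nat) : Int) = (ys.length : Int) + 1 := by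
      simp
    rw [hlen, PySem.List.pyRange_one_succ_right (by positivity), List.foldl_append]
    have hcongr : (PySem.List.pyRange 0 (ys.length : Int)).foldl
        (fun s i => s + i * PySem.List.pyGetD (ys ++ [x]) i 0) 0 = pvInnerSum ys := by
      unfold pvInnerSum
      apply PySem.List.foldl_congr_mem
      intro acc i hi
      rw [PySem.List.mem_pyRange_one] at hi
      have h0 : 0 ≤ i := hi.1
      have h1 : i < (ys.length : Int) := hi.2
      have hlt : i.toNat < ys.length := by omega
      rw [PySem.List.pyGetD_eq_getElem _ _ h0 (by simp; omega),
          PySem.List.pyGetD_eq_getElem _ _ h0 (by omega),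
          List.getElem_append_left hlt]
    rw [hcongr, ih]
    have hx : PySem.List.pyGetD (ys ++ [x]) (ys.length : Int) 0 = x := by
      rw [PySem.List.pyGetD_eq_getElem _ _ (by positivity) (by simp)]
      simp
    simp [List.foldl, hx, pvW_concat]

theorem pvEnumFold (l : List Int) (s acc : Int) :
    (PySem.List.enumerate l s).foldl (fun acc p => acc + p.1 * p.2) acc
      = acc + s * l.sum + pvW l := by
  induction l generalizing s acc with
  | nil => simp [PySem.List.enumerate_nil, pvW]
  | cons x xs ih => simp [PySem.List.enumerate_cons, pvW, ih]; ring

theorem pvRot_length (l : List Int) : (pvRot l).length = l.length := by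
  induction l using List.reverseRecOn with
  | nil => simp [pvRot]
  | append_singleton ys x _ => rw [pvRot_concat]; simp

theorem pvRot_iter_length (l : List Int) (k : Nat) : (pvRot^[k] l).length = l.length := by
  induction k with
  | zero => rfl
  | succ k ih => rw [Function.iterate_succ_apply', pvRot_length, ih]

theorem pvRot_iter_ne_nil (l : List Int) (hl : l ≠ []) (k : Nat) : pvRot^[k] l ≠ [] := by
  have h := pvRot_iter_length l k
  intro hc
  rw [hc] at h
  exact hl (List.eq_nil_of_length_eq_zero h.symm)

theorem pvRot_sum (l : List Int) : (pvRot l).sum = l.sum := by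
  induction l using List.reverseRecOn with
  | nil => simp [pvRot]
  | append_singleton ys x _ => rw [pvRot_concat]; simp [List.sum_append]; ring

theorem pvRot_iter_sum (l : List Int) (k : Nat) : (pvRot^[k] l).sum = l.sum := by
  induction k with
  | zero => rfl
  | succ k ih => rw [Function.iterate_succ_apply', pvRot_sum, ih]

theorem pvRot_iter_eq (l : List Int) (k : Nat) (hk : k ≤ l.length) :
    pvRot^[k] l = l.drop (l.length - k) ++ l.take (l.length - k) := by
  induction k with
  | zero => simp
  | succ k ih =>
    have hk : k ≤ l.length := by omega
    have hm : l.length - k = (l.length - (k + 1)) + 1 := by omega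
    have hmlt : l.length - (k + 1) < l.length := by omega
    rw [Function.iterate_succ_apply', ih hk, hm, List.take_succ,
      List.getElem?_eq_getElem hmlt]
    have : l.drop (l.length - (k + 1) + 1) ++ (l.take (l.length - (k + 1)) ++ [l[l.length - (k+1)]])
        = (l.drop (l.length - (k + 1) + 1) ++ l.take (l.length - (k + 1))) ++ [l[l.length - (k+1)]] := by
      simp
    simp only [Option.toList_some, this, pvRot_concat]
    conv_rhs => rw [List.drop_eq_getElem_cons hmlt]
    rw [List.cons_append]

theorem pvRot_iter_len_self (l : List Int) : pvRot^[l.length] l = l := by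
  have h := pvRot_iter_eq l l.length le_rfl
  simpa using h

theorem pvRot_iter_add (l : List Int) (k : Nat) :
    pvRot^[k + l.length] l = pvRot^[k] l := by
  rw [Function.iterate_add_apply, pvRot_iter_len_self]

theorem pvRot_iter_mod (l : List Int) (k : Nat) :
    pvRot^[k] l = pvRot^[k % l.length] l := by
  have haux : ∀ q r : Nat, pvRot^[r + l.length * q] l = pvRot^[r] l := by
    intro q
    induction q with
    | zero => simp
    | succ q ih =>
      intro r
      have : r + l.length * (q + 1) = (r + l.length * q) + l.length := by ring
      rw [this, pvRot_iter_add, ih]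
  conv_lhs => rw [← Nat.mod_add_div k l.length]
  exact haux _ _

theorem pvW_rot_concat (ys : List Int) (x : Int) :
    pvW (pvRot (ys ++ [x])) = pvW (ys ++ [x]) + (ys ++ [x]).sum - ((ys.length : Int) + 1) * x := by
  rw [pvRot_concat]
  simp [pvW, pvW_concat, List.sum_append]
  ring

-- incremental update: one more rotation adds total - n * (element that moves to the front)
theorem pvW_iter_succ (l : List Int) (m : Nat) (hm : m + 1 ≤ l.length) :
    pvW (pvRot^[m+1] l)
      = pvW (pvRot^[m] l) + l.sum - (l.length : Int) * l.getD (l.length - 1 - m) 0 := by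
  have hmlt : l.length - 1 - m < l.length := by omega
  have htake : l.take (l.length - m) = l.take (l.length - 1 - m) ++ [l[l.length - 1 - m]] := by
    have h1 : l.length - m = (l.length - 1 - m) + 1 := by omega
    rw [h1, List.take_succ, List.getElem?_eq_getElem hmlt, Option.toList_some]
  have hA : pvRot^[m] l
      = (l.drop (l.length - m) ++ l.take (l.length - 1 - m)) ++ [l[l.length - 1 - m]] := by
    rw [pvRot_iter_eq l m (by omega), htake, List.append_assoc]
  have hsum : ((l.drop (l.length - m) ++ l.take (l.length - 1 - m)) ++ [l[l.length - 1 - m]]).sum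
      = l.sum := by
    rw [← hA, pvRot_iter_sum]
  have hlenA : (((l.drop (l.length - m) ++ l.take (l.length - 1 - m)).length : Nat) : Int) + 1
      = (l.length : Int) := by
    have : (l.drop (l.length - m)).length = m := by simp; omega
    have h2 : (l.take (l.length - 1 - m)).length = l.length - 1 - m := by simp; omega
    simp only [List.length_append, this, h2]
    push_cast
    omega
  have hgetD : l.getD (l.length - 1 - m) 0 = l[l.length - 1 - m] := List.getD_eq_getElem l 0 hmlt
  rw [Function.iterate_succ_apply', hA, pvW_rot_concat, hsum, hlenA, hgetD]

theorem pvBest_le (l : List Int) (m j : Nat) (hj : j ≤ m) :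
    pvW (pvRot^[j] l) ≤ (pvBest l m).1 := by
  induction m with
  | zero =>
    have : j = 0 := Nat.le_zero.mp hj
    subst this; exact le_rfl
  | succ m ih =>
    by_cases h : j ≤ m
    · have := ih h
      simp only [pvBest]
      split
      · omega
      · exact this
    · have : j = m + 1 := by omega
      subst this
      simp only [pvBest]
      split
      · exact le_rfl
      · omega

theorem pvBest_stab (l : List Int) (hl : l ≠ []) (m : Nat) (hm : l.length - 1 ≤ m) :
    pvBest l m = pvBest l (l.length - 1) := by
  induction m with
  | zero =>
    have : l.length - 1 = 0 := by omega
    rw [this]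
  | succ m ih =>
    by_cases h : l.length - 1 ≤ m
    · have hstep : pvW (pvRot^[m+1] l) ≤ (pvBest l m).1 := by
        have hpos : 0 < l.length := List.length_pos_iff.mpr hl
        have hmod : pvRot^[m+1] l = pvRot^[(m+1) % l.length] l := pvRot_iter_mod l (m+1)
        have hlt : (m+1) % l.length < l.length := Nat.mod_lt _ hpos
        have : (m+1) % l.length ≤ m := by omega
        rw [hmod]
        exact pvBest_le l m _ this
      have : pvBest l (m+1) = pvBest l m := by
        simp only [pvBest]
        split
        · omega
        · rfl
      rw [this, ih h]
    · have : m + 1 = l.length - 1 := by omega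
      rw [this]

-- the rotation A performs is pvRot (on nonempty lists)
theorem pvStep_rot (t : List Int) (ht : t ≠ []) :
    pvAPopInsert t = pvRot t := by
  obtain ⟨ys, x, rfl⟩ := (List.eq_nil_or_concat t).resolve_left ht
  rw [List.concat_eq_append, pvAPopInsert, PySem.List.pop?_last]
  simp [pvRot_concat, PySem.List.insert_zero]

theorem pvALoop (l : List Int) (hl : l ≠ []) (N : Nat) :
    (PySem.List.pyRange 0 ((N : Int) + 1) 1).foldl pvAStep (l, none, 0)
      = (pvRot^[N+1] l, some (pvBest l N).1, ((pvBest l N).2 : Int)) := by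
  induction N with
  | zero =>
    have h01 : PySem.List.pyRange 0 ((0 : Nat) + 1 : Int) = [0] := by decide
    rw [Nat.cast_zero] at h01 ⊢
    rw [h01]
    simp [pvAStep, pvGtOpt, pvInnerSum_eq, pvStep_rot l hl, pvBest]
  | succ N ih =>
    have hcast : ((N + 1 : Nat) : Int) + 1 = ((N : Int) + 1) + 1 := by push_cast; ring
    rw [hcast, PySem.List.pyRange_one_succ_right (by positivity), List.foldl_append, ih]
    have hne : pvRot^[N+1] l ≠ [] := pvRot_iter_ne_nil l hl (N+1)
    simp only [List.foldl_cons, List.foldl_nil, pvAStep, pvGtOpt, pvInnerSum_eq,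
      pvStep_rot _ hne]
    by_cases h : (pvBest l N).1 < pvW (pvRot^[N+1] l)
    · simp only [pvBest, decide_eq_true_eq, h, if_true]
      refine Prod.ext ?_ (Prod.ext ?_ ?_)
      · simp [← Function.iterate_succ_apply']
      · simp
      · simp
    · simp only [pvBest, decide_eq_true_eq, h, if_false]
      refine Prod.ext ?_ (Prod.ext ?_ ?_)
      · simp [← Function.iterate_succ_apply']
      · simp
      · simp

-- B's loop builds the list of candidate weighted sums [W(rot^0 l), …, W(rot^m l)]
theorem pvCandsLoop (l : List Int) (hl : l ≠ []) (m : Nat) (hm : m ≤ l.length - 1) :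
    (PySem.List.pyRange 0 ((m : Int) + 1) 1).foldl (pvBStep l l.sum (l.length : Int)) (pvW l, [])
      = (pvW (pvRot^[m] l), (List.range (m + 1)).map (fun k => pvW (pvRot^[k] l))) := by
  induction m with
  | zero =>
    have h01 : PySem.List.pyRange 0 ((0 : Nat) + 1 : Int) = [0] := by decide
    rw [Nat.cast_zero] at h01 ⊢
    rw [h01]
    simp [pvBStep]
  | succ m ih =>
    have hlen : 1 ≤ l.length := List.length_pos_iff.mpr hl
    have hcast : ((m + 1 : Nat) : Int) + 1 = ((m : Int) + 1) + 1 := by push_cast; ring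
    rw [hcast, PySem.List.pyRange_one_succ_right (by omega), List.foldl_append, ih (by omega)]
    simp only [List.foldl_cons, List.foldl_nil, pvBStep]
    have hidx : PySem.List.pyGetD l ((l.length : Int) - ((m : Int) + 1)) 0
        = l.getD (l.length - 1 - m) 0 := by
      rw [PySem.List.pyGetD_eq_getElem _ _ (by omega) (by omega),
        List.getD_eq_getElem l 0 (by omega)]
      congr 1
      omega
    have hcur : pvW (pvRot^[m] l) + l.sum
        - (l.length : Int) * PySem.List.pyGetD l ((l.length : Int) - ((m : Int) + 1)) 0
        = pvW (pvRot^[m+1] l) := by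
      rw [hidx, pvW_iter_succ l m (by omega)]
    rw [if_neg (show ¬((m : Int) + 1 = 0) by omega), hcur,
      List.range_succ (n := m + 1), List.map_append]
    simp

-- (pvBest l m).1 is the running maximum of the candidate sums
theorem pvBest_fst (l : List Int) (m : Nat) :
    (pvBest l m).1 = ((List.range m).map (fun j => pvW (pvRot^[j+1] l))).foldl max (pvW l) := by
  induction m with
  | zero => simp [pvBest]
  | succ m ih =>
    rw [List.range_succ, List.map_append, List.foldl_append, ← ih]
    simp only [List.map_cons, List.map_nil, List.foldl_cons, List.foldl_nil, pvBest, max_def]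
    split_ifs <;> omega

theorem pvBest_snd_le (l : List Int) (m : Nat) : (pvBest l m).2 ≤ m := by
  induction m with
  | zero => simp [pvBest]
  | succ m ih =>
    simp only [pvBest]
    split_ifs
    · exact le_rfl
    · omega

theorem pvBest_attains (l : List Int) (m : Nat) :
    pvW (pvRot^[(pvBest l m).2] l) = (pvBest l m).1 := by
  induction m with
  | zero => simp [pvBest]
  | succ m ih =>
    simp only [pvBest]
    split_ifs
    · rfl
    · exact ih

theorem pvBest_lt_before (l : List Int) (m : Nat) (j : Nat) (hj : j < (pvBest l m).2) :
    pvW (pvRot^[j] l) < (pvBest l m).1 := by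
  induction m with
  | zero => simp [pvBest] at hj
  | succ m ih =>
    by_cases h : (pvBest l m).1 < pvW (pvRot^[m+1] l)
    · simp only [pvBest, if_pos h] at hj ⊢
      have hj' : j ≤ m := by omega
      have := pvBest_le l m j hj'
      omega
    · simp only [pvBest, if_neg h] at hj ⊢
      exact ih hj

-- max(sums) is the first-maximum value kept by A
theorem pvMaxCands (l : List Int) (m : Nat) :
    PySem.List.max? ((List.range (m + 1)).map (fun k => pvW (pvRot^[k] l))) (fun x => x)
      = some (pvBest l m).1 := by
  rw [List.range_succ_eq_map, List.map_cons, PySem.List.max?_id_cons, pvBest_fst, List.map_map]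
  rfl

-- sums.index(max(sums)) is the first rotation attaining it, i.e. (pvBest l m).2
theorem pvIndexCands (l : List Int) (m : Nat) :
    PySem.List.index? ((List.range (m + 1)).map (fun k => pvW (pvRot^[k] l)))
      ((pvBest l m).1) = some (pvBest l m).2 := by
  rw [PySem.List.index?_eq_some_iff]
  have hble : (pvBest l m).2 ≤ m := pvBest_snd_le l m
  refine ⟨(List.range (pvBest l m).2).map (fun k => pvW (pvRot^[k] l)),
    (List.range (m - (pvBest l m).2)).map (fun j => pvW (pvRot^[(pvBest l m).2 + (j + 1)] l)),
    ?_, by rw [List.length_map, List.length_range], ?_⟩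
  · have hsplit : m + 1 = (pvBest l m).2 + ((m - (pvBest l m).2) + 1) := by omega
    rw [hsplit, List.range_add, List.map_append, List.range_succ_eq_map]
    simp only [List.map_cons, List.map_map, Nat.add_zero]
    rw [pvBest_attains]
    rfl
  · intro hmem
    obtain ⟨k, hk, hkeq⟩ := List.mem_map.mp hmem
    have hklt : k < (pvBest l m).2 := List.mem_range.mp hk
    have hlt := pvBest_lt_before l m k hklt
    omega

-- ===== VERDICT (by name: the statement is the Claim_ definition above) =====
theorem best_list_pureness_spec : Claim_equal_best_list_pureness := by
  intro l number _ hPre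
  obtain ⟨hl, hnum⟩ := hPre
  unfold Spec_best_list_pureness
  have hlen : 1 ≤ l.length := List.length_pos_iff.mpr hl
  set N := number.toNat with hNdef
  have hnum' : number = (N : Int) := (Int.toNat_of_nonneg hnum).symm
  set M := min N (l.length - 1) with hMdef
  have hminC : min number ((l.length : Int) - 1) = (M : Int) := by
    rw [hnum', hMdef]
    omega
  have hbeq : pvBest l N = pvBest l M := by
    by_cases hc : N ≤ l.length - 1
    · rw [hMdef, min_eq_left hc]
    · rw [hMdef, min_eq_right (by omega), pvBest_stab l hl N (by omega)]
  have hA : best_list_pureness l number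
      = "Best pureness " ++ PySem.Int.toStr (pvBest l N).1 ++ " after "
        ++ PySem.Int.toStr ((pvBest l N).2 : Int) ++ " rotations" := by
    simp only [best_list_pureness]
    rw [hnum', pvALoop l hl N]
  have hs0 : (PySem.List.enumerate l 0).foldl (fun acc p => acc + p.1 * p.2) 0 = pvW l := by
    rw [pvEnumFold l 0 0]
    ring
  have hB : best_list_pureness_alt l number
      = "Best pureness " ++ PySem.Int.toStr (pvBest l M).1 ++ " after "
        ++ PySem.Int.toStr (((pvBest l M).2 : Nat) : Int) ++ " rotations" := by
    simp only [best_list_pureness_alt]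
    rw [hs0, hminC, pvCandsLoop l hl M (min_le_right _ _)]
    simp only [pvMaxCands, pvIndexCands, Option.getD_some]
  rw [hA, hB, hbeq]
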